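-- pv_equiv track=rewrite | github.com/Mariajove/Pruebas-tecnicas | Python(MoureDev)/Prueba29.py | maquina_expendedora
-- ===== SOURCE A (Python) =====
-- articulos = {
--     1: ("Agua Mineral", 100),
--     2: ("Refresco", 150),
--     3: ("Café", 200),
--     4: ("Chocolate", 120),
--     5: ("Galletas", 80),
--     6: ("Chicles", 50),
--     7: ("Frutos Secos", 250),
--     8: ("Bocadillo de Jamón", 300),
--     9: ("Barra de Energía", 150),
--     10: ("Cerveza", 200),
--     11: ("Té Helado", 160),
--     12: ("Snickers", 100),
--     13: ("Patatas Fritas", 90),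
--     14: ("Zumos Naturales", 130),
--     15: ("Caramelos", 40)
-- }
--
-- monedas_disponibles = [5, 10, 20, 50, 100, 200]
--
-- def devolver_cambio(cambio, monedas_disponibles):
--     resultado = []
--     for moneda in sorted(monedas_disponibles, reverse=True):
--         while cambio >= moneda:
--             resultado.append(moneda)
--             cambio -= moneda
--     return resultado
--
-- def maquina_expendedora(monedas, numero_producto):
--     for moneda in monedas:
--         if moneda not in monedas_disponibles:
--             return "Una o más monedas no son válidas. Monedas aceptadas: 5, 10, 50, 100, 200 céntimos."
--     total_dinero = sum(monedas)
--     if numero_producto not in articulos: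
--         return "El número de producto no existe. Por favor, elija un número de producto válido."
--     nombre_articulo, precio_articulo = articulos[numero_producto]
--     if total_dinero < precio_articulo:
--         return f"Dinero insuficiente. Te devuelvo: {monedas}"
--     cambio = total_dinero - precio_articulo
--     monedas_de_vuelta = devolver_cambio(cambio, monedas_disponibles)
--     return f"Has comprado: {nombre_articulo}. Cambio devuelto: {monedas_de_vuelta}"
-- ===== SOURCE B (Python) =====
-- articulos = {
--     1: ("Agua Mineral", 100),
--     2: ("Refresco", 150),
--     3: ("Café", 200),
--     4: ("Chocolate", 120),
--     5: ("Galletas", 80),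
--     6: ("Chicles", 50),
--     7: ("Frutos Secos", 250),
--     8: ("Bocadillo de Jamón", 300),
--     9: ("Barra de Energía", 150),
--     10: ("Cerveza", 200),
--     11: ("Té Helado", 160),
--     12: ("Snickers", 100),
--     13: ("Patatas Fritas", 90),
--     14: ("Zumos Naturales", 130),
--     15: ("Caramelos", 40)
-- }
--
-- monedas_disponibles = [5, 10, 20, 50, 100, 200]
--
--
-- def maquina_expendedora(monedas, numero_producto):
--     if not all(m in monedas_disponibles for m in monedas):
--         return "Una o más monedas no son válidas. Monedas aceptadas: 5, 10, 50, 100, 200 céntimos."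
--     articulo = articulos.get(numero_producto)
--     if articulo is None:
--         return "El número de producto no existe. Por favor, elija un número de producto válido."
--     nombre, precio = articulo
--     total = sum(monedas)
--     if total < precio:
--         return f"Dinero insuficiente. Te devuelvo: {monedas}"
--     cambio = total - precio
--     vuelta = []
--     for moneda in sorted(monedas_disponibles, reverse=True):
--         n, cambio = divmod(cambio, moneda)
--         vuelta.extend([moneda] * n)
--     return f"Has comprado: {nombre}. Cambio devuelto: {vuelta}"
-- ===== Notes on version B (the rewrite author's own statement) =====
-- stated objective: simpler
-- what changed: The change-making loop computes each coin's count with one divmod instead of A's per-unit repeated-subtraction inner while loop, and the validation/lookup glue is restructured (all() + dict.get instead of an early-return loop and 'in'+indexing), returning the identical strings.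
import Mathlib
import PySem

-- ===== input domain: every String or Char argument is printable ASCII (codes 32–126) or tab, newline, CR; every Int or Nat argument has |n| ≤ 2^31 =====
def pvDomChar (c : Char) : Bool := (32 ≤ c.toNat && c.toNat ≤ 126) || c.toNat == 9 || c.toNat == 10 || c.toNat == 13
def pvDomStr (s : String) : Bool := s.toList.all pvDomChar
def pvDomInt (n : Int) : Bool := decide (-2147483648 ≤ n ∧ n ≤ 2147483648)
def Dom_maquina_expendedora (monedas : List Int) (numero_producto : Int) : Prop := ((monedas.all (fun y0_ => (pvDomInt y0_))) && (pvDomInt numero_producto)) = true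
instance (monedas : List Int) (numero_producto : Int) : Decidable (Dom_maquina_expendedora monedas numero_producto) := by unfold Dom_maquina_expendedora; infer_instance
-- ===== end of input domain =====

-- B replaces A's per-unit repeated-subtraction change loop by one divmod per coin
-- (objective: simpler); the validation/lookup glue is restructured (all + dict.get)
-- but returns the identical strings.

-- shared module-level context (the Python module's globals, used by both programs)
def pvArticulos : PySem.Dict Int (String × Int) := PySem.Dict.ofList
  [(1, ("Agua Mineral", 100)), (2, ("Refresco", 150)), (3, ("Café", 200)),
   (4, ("Chocolate", 120)), (5, ("Galletas", 80)), (6, ("Chicles", 50)),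
   (7, ("Frutos Secos", 250)), (8, ("Bocadillo de Jamón", 300)),
   (9, ("Barra de Energía", 150)), (10, ("Cerveza", 200)), (11, ("Té Helado", 160)),
   (12, ("Snickers", 100)), (13, ("Patatas Fritas", 90)), (14, ("Zumos Naturales", 130)),
   (15, ("Caramelos", 40))]

def pvMonedasDisponibles : List Int := [5, 10, 20, 50, 100, 200]

-- f"{xs}" for a list of ints (Python list repr)
def pyIntListRepr (xs : List Int) : String :=
  "[" ++ PySem.Str.join ", " (xs.map PySem.Int.toStr) ++ "]"

-- ===== PORT A =====
-- the inner 'while cambio >= moneda' loop; fuel only makes it total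
-- (cambio.toNat + 1 steps always suffice since every coin is positive)
def pvWhileCoin : Nat → Int → Int → List Int → List Int × Int
  | 0, _, cambio, acc => (acc, cambio)
  | fuel + 1, moneda, cambio, acc =>
    if cambio ≥ moneda then pvWhileCoin fuel moneda (cambio - moneda) (acc ++ [moneda])
    else (acc, cambio)

def devolver_cambio (cambio : Int) (monedas_disponibles : List Int) : List Int :=
  ((PySem.List.sorted monedas_disponibles (fun x => x) true).foldl
    (fun st moneda => pvWhileCoin (st.2.toNat + 1) moneda st.2 st.1) ([], cambio)).1

-- the early-return validation loop of A
def pvCheckA : List Int → Option String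
  | [] => none
  | moneda :: rest =>
    if ¬ (pvMonedasDisponibles.contains moneda) then
      some "Una o más monedas no son válidas. Monedas aceptadas: 5, 10, 50, 100, 200 céntimos."
    else pvCheckA rest

def maquina_expendedora (monedas : List Int) (numero_producto : Int) : String :=
  match pvCheckA monedas with
  | some msg => msg
  | none =>
    let total_dinero := monedas.foldl (· + ·) 0
    match PySem.Dict.get? pvArticulos numero_producto with
    | none => "El número de producto no existe. Por favor, elija un número de producto válido."
    | some (nombre_articulo, precio_articulo) =>
      if total_dinero < precio_articulo then
        "Dinero insuficiente. Te devuelvo: " ++ pyIntListRepr monedas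
      else
        let cambio := total_dinero - precio_articulo
        let monedas_de_vuelta := devolver_cambio cambio pvMonedasDisponibles
        "Has comprado: " ++ nombre_articulo ++ ". Cambio devuelto: " ++ pyIntListRepr monedas_de_vuelta

-- ===== PORT B =====
def maquina_expendedora_alt (monedas : List Int) (numero_producto : Int) : String :=
  if ¬ (monedas.all (fun m => pvMonedasDisponibles.contains m)) then
    "Una o más monedas no son válidas. Monedas aceptadas: 5, 10, 50, 100, 200 céntimos."
  else
    match PySem.Dict.get? pvArticulos numero_producto with
    | none => "El número de producto no existe. Por favor, elija un número de producto válido."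
    | some (nombre, precio) =>
      let total := monedas.foldl (· + ·) 0
      if total < precio then
        "Dinero insuficiente. Te devuelvo: " ++ pyIntListRepr monedas
      else
        let cambio := total - precio
        let vuelta := ((PySem.List.sorted pvMonedasDisponibles (fun x => x) true).foldl
          (fun (st : List Int × Int) moneda =>
            (st.1 ++ List.replicate (PySem.Int.floordiv st.2 moneda).toNat moneda,
             PySem.Int.mod st.2 moneda)) ([], cambio)).1
        "Has comprado: " ++ nombre ++ ". Cambio devuelto: " ++ pyIntListRepr vuelta

-- ===== PRECONDITION & SPEC =====
def Spec_maquina_expendedora (monedas : List Int) (numero_producto : Int) (out : String) : Prop := out = maquina_expendedora_alt monedas numero_producto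
instance (monedas : List Int) (numero_producto : Int) (out : String) : Decidable (Spec_maquina_expendedora monedas numero_producto out) := by unfold Spec_maquina_expendedora; infer_instance

-- ===== CLAIM (what is proved, stated in full; the proofs are below) =====
def Claim_equal_maquina_expendedora : Prop := ∀ (monedas : List Int) (numero_producto : Int), Dom_maquina_expendedora monedas numero_producto → Spec_maquina_expendedora monedas numero_producto (maquina_expendedora monedas numero_producto)

-- ===== LEMMAS AND PROOFS =====

-- A's validation loop succeeds iff every coin is a valid coin (B's 'all' test)
lemma pvCheckA_eq_none_iff (xs : List Int) :
    pvCheckA xs = none ↔ ∀ x ∈ xs, x ∈ pvMonedasDisponibles := by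
  induction xs with
  | nil => simp [pvCheckA]
  | cons m rest ih =>
    by_cases h : m ∈ pvMonedasDisponibles <;> simp [pvCheckA, h, ih]

lemma pvCheckA_eq_some (xs : List Int)
    (h : ¬ ∀ x ∈ xs, x ∈ pvMonedasDisponibles) :
    pvCheckA xs = some "Una o más monedas no son válidas. Monedas aceptadas: 5, 10, 50, 100, 200 céntimos." := by
  induction xs with
  | nil => simp at h
  | cons m rest ih =>
    by_cases hm : m ∈ pvMonedasDisponibles
    · have h' : ¬ ∀ x ∈ rest, x ∈ pvMonedasDisponibles := by
        intro hr
        exact h (by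
          intro x hx
          rcases List.mem_cons.mp hx with rfl | hx
          · exact hm
          · exact hr x hx)
      simp [pvCheckA, hm, ih h']
    · simp [pvCheckA, hm]

-- the while loop = append replicate (floordiv) and leave mod, for a positive coin
lemma pvWhileCoin_eq (fuel : Nat) (m c : Int) (acc : List Int)
    (hm : 0 < m) (hc : 0 ≤ c) (hfuel : c.toNat < fuel) :
    pvWhileCoin fuel m c acc =
      (acc ++ List.replicate (PySem.Int.floordiv c m).toNat m, PySem.Int.mod c m) := by
  induction fuel generalizing c acc with
  | zero => omega
  | succ fuel ih =>
    rw [pvWhileCoin]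
    by_cases h : c ≥ m
    · rw [if_pos h, ih (c - m) (acc ++ [m]) (by omega) (by omega)]
      have hdiv : PySem.Int.floordiv (c - m) m = PySem.Int.floordiv c m - 1 := by
        rw [PySem.Int.floordiv_eq_ediv_of_pos hm, PySem.Int.floordiv_eq_ediv_of_pos hm]
        have he : c - m = c + (-1) * m := by ring
        rw [he, Int.add_mul_ediv_right _ _ (by omega : m ≠ 0)]
        ring
      have hmod : PySem.Int.mod (c - m) m = PySem.Int.mod c m := by
        rw [PySem.Int.mod_eq_emod_of_pos hm, PySem.Int.mod_eq_emod_of_pos hm]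
        exact Int.sub_emod_right c m
      have h0 : 0 ≤ PySem.Int.floordiv (c - m) m := by
        rw [PySem.Int.floordiv_eq_ediv_of_pos hm]
        exact Int.ediv_nonneg (by omega) (by omega)
      have hnat : (PySem.Int.floordiv c m).toNat = (PySem.Int.floordiv (c - m) m).toNat + 1 := by
        omega
      rw [hmod, hnat, List.replicate_succ]
      simp
    · rw [if_neg h]
      have hlt : c < m := by omega
      have hdiv0 : PySem.Int.floordiv c m = 0 := by
        rw [PySem.Int.floordiv_eq_ediv_of_pos hm]
        exact Int.ediv_eq_zero_of_lt hc hlt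
      have hmod0 : PySem.Int.mod c m = c := by
        rw [PySem.Int.mod_eq_emod_of_pos hm]
        exact Int.emod_eq_of_lt hc hlt
      simp [hdiv0, hmod0]

-- the coin fold of A equals the divmod fold of B, coin by coin
lemma fold_eq (coins : List Int) (hpos : ∀ m ∈ coins, 0 < m) :
    ∀ (acc : List Int) (c : Int), 0 ≤ c →
    coins.foldl (fun st moneda => pvWhileCoin (st.2.toNat + 1) moneda st.2 st.1) (acc, c) =
    coins.foldl (fun (st : List Int × Int) moneda =>
      (st.1 ++ List.replicate (PySem.Int.floordiv st.2 moneda).toNat moneda,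
       PySem.Int.mod st.2 moneda)) (acc, c) := by
  induction coins with
  | nil => intro acc c _; rfl
  | cons m rest ih =>
    intro acc c hc
    have hm : 0 < m := hpos m (by simp)
    have hstep := pvWhileCoin_eq (c.toNat + 1) m c acc hm hc (by omega)
    simp only [List.foldl_cons, hstep]
    exact ih (fun x hx => hpos x (by simp [hx])) _ _ (PySem.Int.mod_nonneg c hm)

lemma sorted_coins :
    PySem.List.sorted pvMonedasDisponibles (fun x => x) true = [200, 100, 50, 20, 10, 5] := by
  decide

-- ===== VERDICT (by name: the statement is the Claim_ definition above) =====
theorem maquina_expendedora_spec : Claim_equal_maquina_expendedora := by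
  intro monedas numero_producto _
  show maquina_expendedora monedas numero_producto = maquina_expendedora_alt monedas numero_producto
  unfold maquina_expendedora maquina_expendedora_alt
  by_cases hall : ∀ x ∈ monedas, x ∈ pvMonedasDisponibles
  · rw [(pvCheckA_eq_none_iff monedas).mpr hall, if_neg (by simpa using hall)]
    cases hget : PySem.Dict.get? pvArticulos numero_producto with
    | none => rfl
    | some p =>
      obtain ⟨nombre, precio⟩ := p
      simp only
      by_cases hlt : monedas.foldl (· + ·) 0 < precio
      · rw [if_pos hlt, if_pos hlt]
      · rw [if_neg hlt, if_neg hlt]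
        have hc : 0 ≤ monedas.foldl (· + ·) 0 - precio := by omega
        unfold devolver_cambio
        rw [sorted_coins, fold_eq [200, 100, 50, 20, 10, 5] (by decide) [] _ hc]
  · rw [pvCheckA_eq_some monedas hall, if_pos (by simpa using hall)]
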